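-- pv_equiv track=rewrite | github.com/Bohndiggin/storymaster | storymaster/view/common/spellcheck.py | _get_word_at_position
-- ===== SOURCE A (Python) =====
-- def _get_word_at_position(text: str, pos: int) -> str:
--     """Get the word at a specific position"""
--     if pos < 0 or pos >= len(text):
--         return ""
--
--     start = pos
--     while start > 0 and text[start - 1].isalpha():
--         start -= 1
--
--     end = pos
--     while end < len(text) and text[end].isalpha():
--         end += 1
--
--     return text[start:end]
-- ===== SOURCE B (Python) =====
-- def _get_word_at_position(text: str, pos: int) -> str:
--     """Get the word at a specific position.
--
--     Split the text at the cursor and glue together the alphabetic tail of the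
--     left half (read backwards) with the alphabetic head of the right half.
--     """
--     if not (0 <= pos < len(text)):
--         return ""
--     before = []
--     for ch in reversed(text[:pos]):
--         if not ch.isalpha():
--             break
--         before.append(ch)
--     after = []
--     for ch in text[pos:]:
--         if not ch.isalpha():
--             break
--         after.append(ch)
--     before.reverse()
--     return "".join(before + after)
-- ===== Notes on version B (the rewrite author's own statement) =====
-- stated objective: alternative
-- what changed: Instead of expanding two indices outward from pos and slicing, B splits the text at the cursor and concatenates the alphabetic suffix of the left half (scanned in reverse with an early break) with the alphabetic prefix of the right half.
import Mathlib
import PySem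

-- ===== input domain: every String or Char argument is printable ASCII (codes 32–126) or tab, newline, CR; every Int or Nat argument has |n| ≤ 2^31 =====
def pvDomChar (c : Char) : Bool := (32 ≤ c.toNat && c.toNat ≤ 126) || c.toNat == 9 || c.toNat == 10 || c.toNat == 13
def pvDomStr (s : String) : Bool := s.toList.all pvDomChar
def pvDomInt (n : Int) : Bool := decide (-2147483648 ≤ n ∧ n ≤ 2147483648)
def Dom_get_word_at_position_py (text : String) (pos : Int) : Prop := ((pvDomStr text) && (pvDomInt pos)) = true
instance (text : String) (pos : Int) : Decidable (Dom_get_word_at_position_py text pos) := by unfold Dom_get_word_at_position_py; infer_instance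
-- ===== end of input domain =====

-- B splits the text at the cursor and glues the alphabetic tail of the left half (read
-- backwards) with the alphabetic head of the right half, instead of A's index expansion
-- plus slicing; alternative decomposition, same exact result.

-- ===== PORT A =====
-- while start > 0 and text[start - 1].isalpha(): start -= 1
-- (the index start-1 is provably in range here, so getD is exact)
def aStartLoop (cs : List Char) : Nat → Nat
  | 0 => 0
  | s + 1 => if PySem.Chars.isalpha (cs.getD s ' ') then aStartLoop cs s else s + 1

-- while end < len(text) and text[end].isalpha(): end += 1
def aEndLoop (cs : List Char) (e : Nat) : Nat :=
  if h : e < cs.length then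
    if PySem.Chars.isalpha cs[e] then aEndLoop cs (e + 1) else e
  else e
termination_by cs.length - e

def get_word_at_position_py (text : String) (pos : Int) : String :=
  let cs := text.toList
  if pos < 0 ∨ (cs.length : Int) ≤ pos then ""
  else
    let start := aStartLoop cs pos.toNat
    let e := aEndLoop cs pos.toNat
    String.mk (PySem.List.slice cs (some (start : Int)) (some (e : Int)))

-- ===== PORT B =====
-- the 'for ch in …: if not ch.isalpha(): break; acc.append(ch)' loops of Source B
def takeAlpha : List Char → List Char
  | [] => []
  | c :: r => if PySem.Chars.isalpha c then c :: takeAlpha r else []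

def get_word_at_position_py_alt (text : String) (pos : Int) : String :=
  let cs := text.toList
  if 0 ≤ pos ∧ pos < (cs.length : Int) then
    let p := pos.toNat
    let before := takeAlpha ((cs.take p).reverse)   -- reversed(text[:pos]) scanned until break
    let after := takeAlpha (cs.drop p)              -- text[pos:] scanned until break
    String.mk (before.reverse ++ after)
  else ""

-- ===== PRECONDITION & SPEC =====
def Spec_get_word_at_position_py (text : String) (pos : Int) (out : String) : Prop := out = get_word_at_position_py_alt text pos
instance (text : String) (pos : Int) (out : String) : Decidable (Spec_get_word_at_position_py text pos out) := by unfold Spec_get_word_at_position_py; infer_instance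

-- ===== CLAIM (what is proved, stated in full; the proofs are below) =====
def Claim_equal_get_word_at_position_py : Prop := ∀ (text : String) (pos : Int), Dom_get_word_at_position_py text pos → Spec_get_word_at_position_py text pos (get_word_at_position_py text pos)

-- ===== LEMMAS AND PROOFS =====

theorem takeAlpha_length_le (l : List Char) : (takeAlpha l).length ≤ l.length := by
  induction l with
  | nil => simp [takeAlpha]
  | cons c r ih =>
    simp only [takeAlpha]
    split <;> simp <;> omega

theorem takeAlpha_eq_take (l : List Char) : takeAlpha l = l.take (takeAlpha l).length := by
  induction l with
  | nil => simp [takeAlpha]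
  | cons c r ih =>
    simp only [takeAlpha]
    split
    · simp only [List.length_cons, List.take_succ_cons]
      rw [← ih]
    · simp

theorem aEndLoop_eq (cs : List Char) (e : Nat) :
    aEndLoop cs e = e + (takeAlpha (cs.drop e)).length := by
  fun_induction aEndLoop cs e with
  | case1 e h halpha ih =>
    rw [List.drop_eq_getElem_cons h, takeAlpha, if_pos halpha, ih]
    simp; omega
  | case2 e h halpha =>
    rw [List.drop_eq_getElem_cons h, takeAlpha, if_neg halpha]
    simp
  | case3 e h =>
    rw [List.drop_eq_nil_of_le (by omega)]
    simp [takeAlpha]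

theorem aStartLoop_eq (cs : List Char) (s : Nat) (hs : s ≤ cs.length) :
    aStartLoop cs s = s - (takeAlpha ((cs.take s).reverse)).length := by
  induction s with
  | zero => simp [aStartLoop, takeAlpha]
  | succ s ih =>
    have hlt : s < cs.length := by omega
    have htake : (cs.take (s + 1)).reverse = cs[s] :: (cs.take s).reverse := by
      rw [List.take_add_one]
      simp [List.getElem?_eq_getElem hlt]
    rw [aStartLoop, List.getD_eq_getElem?_getD, List.getElem?_eq_getElem hlt, htake]
    simp only [Option.getD_some, takeAlpha]
    split
    · have hb : (takeAlpha ((cs.take s).reverse)).length ≤ s := by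
        have := takeAlpha_length_le ((cs.take s).reverse)
        simp at this; omega
      rw [ih (by omega)]
      simp only [List.length_cons]
      omega
    · simp

-- reading takeAlpha of a reversed list is a suffix of the list
theorem rev_takeAlpha_drop (l : List Char) :
    (takeAlpha l.reverse).reverse = l.drop (l.length - (takeAlpha l.reverse).length) := by
  conv_lhs => rw [takeAlpha_eq_take l.reverse]
  rw [List.take_reverse, List.reverse_reverse]

-- the bodies of the two guarded branches agree
theorem body_eq (cs : List Char) (p : Nat) (hp : p < cs.length) :
    PySem.List.slice cs (some ((aStartLoop cs p : Nat) : Int)) (some ((aEndLoop cs p : Nat) : Int))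
      = (takeAlpha ((cs.take p).reverse)).reverse ++ takeAlpha (cs.drop p) := by
  have htakelen : (cs.take p).length = p := by simp; omega
  have hblen : (takeAlpha ((cs.take p).reverse)).length ≤ p := by
    have := takeAlpha_length_le ((cs.take p).reverse)
    simp only [List.length_reverse, htakelen] at this; exact this
  rw [aStartLoop_eq cs p (le_of_lt hp), aEndLoop_eq cs p, PySem.List.slice_natCast]
  have key : ∀ A B : List Char, A.length = p →
      (A ++ B).drop (p - (takeAlpha A.reverse).length) = (takeAlpha A.reverse).reverse ++ B := by
    intro A B hA
    rw [List.drop_append_of_le_length (by have := takeAlpha_length_le A.reverse; simp at this; omega)]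
    congr 1
    have h := rev_takeAlpha_drop A
    rw [hA] at h
    exact h.symm
  have hdrop := key (cs.take p) (cs.drop p) htakelen
  rw [List.take_append_drop] at hdrop
  rw [hdrop, List.take_append]
  have h1 : (takeAlpha ((cs.take p).reverse)).reverse.length = (takeAlpha ((cs.take p).reverse)).length := by
    simp
  rw [List.take_of_length_le (by omega), h1]
  congr 1
  have h2 : p + (takeAlpha (cs.drop p)).length - (p - (takeAlpha ((cs.take p).reverse)).length)
      - (takeAlpha ((cs.take p).reverse)).length = (takeAlpha (cs.drop p)).length := by omega
  rw [h2]
  exact (takeAlpha_eq_take (cs.drop p)).symm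

-- ===== VERDICT (by name: the statement is the Claim_ definition above) =====
theorem get_word_at_position_py_spec : Claim_equal_get_word_at_position_py := by
  intro text pos _
  unfold Spec_get_word_at_position_py get_word_at_position_py get_word_at_position_py_alt
  simp only
  by_cases hg : pos < 0 ∨ (text.toList.length : Int) ≤ pos
  · rw [if_pos hg, if_neg (by omega)]
  · rw [if_neg hg, if_pos (by omega)]
    have hp : pos.toNat < text.toList.length := by omega
    rw [body_eq text.toList pos.toNat hp]
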